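-- pv_equiv track=rewrite | github.com/dejuata/AlphaZero-Univalle | app/game/game.py | sort_moves
-- ===== SOURCE A (Python) =====
-- def sort_moves(apples, moves):
--     init = list()
--     last = list()
--     for m in moves:
--         if m in apples:
--             init.append(m)
--         else:
--             last.append(m)
--     return init + last
-- ===== SOURCE B (Python) =====
-- def sort_moves(apples, moves):
--     return sorted(moves, key=lambda m: m not in apples)
-- ===== Notes on version B (the rewrite author's own statement) =====
-- stated objective: idiomatic
-- what changed: Replaces the two-bucket partition loop with a single stable sort keyed on non-membership in apples; stability preserves relative order within each group.
import Mathlib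
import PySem

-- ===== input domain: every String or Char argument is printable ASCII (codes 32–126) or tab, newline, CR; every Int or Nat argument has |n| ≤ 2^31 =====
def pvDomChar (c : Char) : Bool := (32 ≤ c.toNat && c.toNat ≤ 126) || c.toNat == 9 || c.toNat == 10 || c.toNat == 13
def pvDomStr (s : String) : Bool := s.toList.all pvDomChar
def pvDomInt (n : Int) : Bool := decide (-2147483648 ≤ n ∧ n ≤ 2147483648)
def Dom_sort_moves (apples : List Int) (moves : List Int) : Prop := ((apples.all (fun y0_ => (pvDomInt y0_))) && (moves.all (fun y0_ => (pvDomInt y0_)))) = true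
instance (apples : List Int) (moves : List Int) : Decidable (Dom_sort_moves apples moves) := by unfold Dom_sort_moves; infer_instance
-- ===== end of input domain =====

-- B replaces A's two-bucket partition loop by a single stable sort on the boolean
-- key "m not in apples" (idiomatic; same return value, no speed claim).

-- ===== PORT A =====
-- for m in moves: if m in apples: init.append(m) else: last.append(m); return init + last
def sort_moves (apples : List Int) (moves : List Int) : List Int :=
  let st := moves.foldl
    (fun (st : List Int × List Int) m =>
      if m ∈ apples then (st.1 ++ [m], st.2) else (st.1, st.2 ++ [m]))
    ([], [])
  st.1 ++ st.2

-- ===== PORT B =====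
-- return sorted(moves, key=lambda m: m not in apples)   (stable sort, Bool key False < True)
def sort_moves_alt (apples : List Int) (moves : List Int) : List Int :=
  PySem.List.sorted moves (fun m => decide (m ∉ apples))

-- ===== PRECONDITION & SPEC =====
def Spec_sort_moves (apples : List Int) (moves : List Int) (out : List Int) : Prop := out = sort_moves_alt apples moves
instance (apples : List Int) (moves : List Int) (out : List Int) : Decidable (Spec_sort_moves apples moves out) := by unfold Spec_sort_moves; infer_instance

-- ===== CLAIM (what is proved, stated in full; the proofs are below) =====
def Claim_equal_sort_moves : Prop := ∀ (apples : List Int) (moves : List Int), Dom_sort_moves apples moves → Spec_sort_moves apples moves (sort_moves apples moves)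

-- ===== LEMMAS AND PROOFS =====

-- x goes to the front of a block in which every element compares after it
theorem insertBy_of_forall_before {α : Type} (bef : α → α → Bool) (x : α) (ys : List α)
    (h : ∀ y ∈ ys, bef x y = true) :
    PySem.List.insertBy bef x ys = x :: ys := by
  cases ys with
  | nil => rfl
  | cons t ts => simp [PySem.List.insertBy, h t (by simp)]

-- insertion skips a prefix in which no element compares after x
theorem insertBy_append_left {α : Type} (bef : α → α → Bool) (x : α) (F T : List α)
    (hF : ∀ y ∈ F, bef x y = false) :
    PySem.List.insertBy bef x (F ++ T) = F ++ PySem.List.insertBy bef x T := by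
  induction F with
  | nil => rfl
  | cons f fs ih =>
      simp [PySem.List.insertBy, hF f (by simp)]
      exact ih (fun y hy => hF y (by simp [hy]))

-- invariant of the insertion-sort foldl with a boolean key c : each false-key element
-- is appended to the F block, each true-key element to the end
theorem foldl_insertBy_bool {α : Type} (c : α → Bool) (moves F T : List α)
    (hF : ∀ y ∈ F, c y = false) (hT : ∀ y ∈ T, c y = true) :
    moves.foldl (fun acc x => PySem.List.insertBy (fun a b => decide (c a < c b)) x acc) (F ++ T)
      = (F ++ moves.filter (fun m => !c m)) ++ (T ++ moves.filter c) := by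
  induction moves generalizing F T with
  | nil => simp
  | cons x xs ih =>
      by_cases hx : c x = true
      · have h1 : PySem.List.insertBy (fun a b => decide (c a < c b)) x (F ++ T)
            = F ++ (T ++ [x]) := by
          rw [← List.append_assoc]
          exact PySem.List.insertBy_of_forall_not_before _ x (F ++ T)
            (fun y _ => by simp [hx, Bool.lt_iff])
        have hT' : ∀ y ∈ T ++ [x], c y = true := by
          intro y hy
          rcases List.mem_append.mp hy with h | h
          · exact hT y h
          · simp at h; simp [h, hx]
        have h2 := ih F (T ++ [x]) hF hT'
        rw [List.foldl_cons, h1, h2]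
        simp [hx]
      · have hx' : c x = false := by simpa using hx
        have h1 : PySem.List.insertBy (fun a b => decide (c a < c b)) x (F ++ T)
            = (F ++ [x]) ++ T := by
          rw [insertBy_append_left _ x F T (fun y hy => by simp [Bool.lt_iff, hF y hy])]
          rw [insertBy_of_forall_before _ x T (fun y hy => by simp [hx', Bool.lt_iff, hT y hy])]
          simp
        have hF' : ∀ y ∈ F ++ [x], c y = false := by
          intro y hy
          rcases List.mem_append.mp hy with h | h
          · exact hF y h
          · simp at h; simp [h, hx']
        have h2 := ih (F ++ [x]) T hF' hT
        rw [List.foldl_cons, h1, h2]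
        simp [hx']

-- B computes filter-in ++ filter-out
theorem alt_eq_filters (apples moves : List Int) :
    sort_moves_alt apples moves
      = moves.filter (fun m => decide (m ∈ apples)) ++ moves.filter (fun m => decide (m ∉ apples)) := by
  unfold sort_moves_alt
  rw [PySem.List.sorted_eq_foldl_insertBy]
  have h := foldl_insertBy_bool (fun m => decide (m ∉ apples)) moves [] [] (by simp) (by simp)
  simp only [List.nil_append, List.append_nil] at h
  rw [h]
  congr 1
  apply List.filter_congr
  intro m _
  simp

-- A's loop with two accumulators computes the same two filters
theorem a_loop_eq (apples : List Int) (moves : List Int) :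
    ∀ (i l : List Int),
      moves.foldl
        (fun (st : List Int × List Int) m =>
          if m ∈ apples then (st.1 ++ [m], st.2) else (st.1, st.2 ++ [m])) (i, l)
      = (i ++ moves.filter (fun m => decide (m ∈ apples)),
         l ++ moves.filter (fun m => decide (m ∉ apples))) := by
  induction moves with
  | nil => intro i l; simp
  | cons x xs ih =>
      intro i l
      by_cases hx : x ∈ apples
      · simp [hx, ih]
      · simp [hx, ih]

-- ===== VERDICT (by name: the statement is the Claim_ definition above) =====
theorem sort_moves_spec : Claim_equal_sort_moves := by
  intro apples moves _
  unfold Spec_sort_moves sort_moves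
  rw [a_loop_eq apples moves [] [], alt_eq_filters]
  simp
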